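-- pv_equiv track=rewrite | github.com/SleepingJempa/Freelancing | AlgortihmEOS/Graph/4.py | dfs
-- ===== SOURCE A (Python) =====
-- def dfs(n, s, a, b, chk):
--     if s >= n or s < 0 or chk[s]: return 0
--
--     chk[s] = True
--
--     return (
--         1
--         + dfs(n, s-a, a, b, chk)
--         + dfs(n, s-b, a, b, chk)
--         + dfs(n, s+a, a, b, chk)
--         + dfs(n, s+b, a, b, chk)
--     )
-- ===== SOURCE B (Python) =====
-- def dfs(n, s, a, b, chk):
--     # Iterative DFS with an explicit stack instead of recursion.
--     # Neighbors are pushed so that pos-a is popped first, i.e. cells are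
--     # visited (and chk mutated in place) in the same order as the recursive
--     # version; each cell is counted once, when it is marked.
--     stack = [s]
--     cnt = 0
--     while stack:
--         pos = stack.pop()
--         if pos >= n or pos < 0 or chk[pos]:
--             continue
--         chk[pos] = True
--         cnt += 1
--         stack.append(pos + b)
--         stack.append(pos + a)
--         stack.append(pos - b)
--         stack.append(pos - a)
--     return cnt
-- ===== Notes on version B (the rewrite author's own statement) =====
-- stated objective: alternative
-- what changed: Replaces the 4-way recursive DFS by an iterative DFS over an explicit worklist stack with a counter, counting each cell once when it is marked.
import Mathlib
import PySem

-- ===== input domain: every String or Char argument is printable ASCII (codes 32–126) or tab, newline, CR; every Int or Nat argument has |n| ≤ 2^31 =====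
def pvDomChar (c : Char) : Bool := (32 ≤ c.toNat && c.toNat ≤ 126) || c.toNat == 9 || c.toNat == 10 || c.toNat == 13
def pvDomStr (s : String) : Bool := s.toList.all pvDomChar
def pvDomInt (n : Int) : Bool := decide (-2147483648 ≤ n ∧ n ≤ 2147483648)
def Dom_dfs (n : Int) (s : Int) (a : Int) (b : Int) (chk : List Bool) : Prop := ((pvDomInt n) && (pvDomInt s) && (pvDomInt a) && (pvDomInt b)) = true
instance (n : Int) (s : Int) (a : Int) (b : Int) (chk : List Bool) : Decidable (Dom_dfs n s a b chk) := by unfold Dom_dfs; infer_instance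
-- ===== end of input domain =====

-- B replaces A's 4-way recursive DFS by an iterative DFS over an explicit stack
-- (same visited set, same in-place chk mutation order; equivalence proved for the return value).


-- number of still-unmarked cells (termination measure for the iterative port)
def pvCountFalse (chk : List Bool) : Nat := chk.count false

-- termination lemma for dfs_alt's loop: marking a cell that was False shrinks the measure
theorem pvCountFalse_set_lt : ∀ (chk : List Bool) (j : Nat), chk[j]? = some false →
    pvCountFalse (chk.set j true) < pvCountFalse chk := by
  intro chk
  induction chk with
  | nil => intro j h; simp at h
  | cons x xs ih =>
    intro j h
    cases j with
    | zero =>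
      simp at h
      simp [pvCountFalse, h]
    | succ k =>
      simp at h
      have := ih k h
      simp [pvCountFalse, List.count_cons] at *
      omega

theorem pvCountFalse_set_lt' (chk : List Bool) (p : Int) (hp : 0 ≤ p)
    (h : PySem.List.pyGet? chk p = some false) :
    pvCountFalse (chk.set p.toNat true) < pvCountFalse chk := by
  rw [PySem.List.pyGet?_of_nonneg _ hp] at h
  exact pvCountFalse_set_lt chk p.toNat h

-- ===== PORT A =====
-- Literal port of A's recursion; the Nat fuel is only a totality guard
-- (chk.length + 1 levels can never be exhausted, since each level marks a fresh cell).
def dfsA (n a b : Int) : Nat → Int → List Bool → Int × List Bool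
  | 0, _, chk => (0, chk)
  | fuel + 1, s, chk =>
    if s ≥ n ∨ s < 0 then (0, chk)
    else
      match PySem.List.pyGet? chk s with
      | none => (0, chk)        -- IndexError in Python; excluded by Pre_dfs
      | some true => (0, chk)
      | some false =>
        let chk1 := chk.set s.toNat true
        let r1 := dfsA n a b fuel (s - a) chk1
        let r2 := dfsA n a b fuel (s - b) r1.2
        let r3 := dfsA n a b fuel (s + a) r2.2
        let r4 := dfsA n a b fuel (s + b) r3.2
        (1 + r1.1 + r2.1 + r3.1 + r4.1, r4.2)

def dfs (n : Int) (s : Int) (a : Int) (b : Int) (chk : List Bool) : Int :=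
  (dfsA n a b (chk.length + 1) s chk).1

-- ===== PORT B =====
-- the while-loop of Source B: stack (head = top), chk, counter
def dfsB (n a b : Int) : List Int → List Bool → Int → Int × List Bool
  | [], chk, cnt => (cnt, chk)
  | pos :: rest, chk, cnt =>
    if pos ≥ n ∨ pos < 0 then dfsB n a b rest chk cnt
    else
      match h : PySem.List.pyGet? chk pos with
      | none => dfsB n a b rest chk cnt      -- IndexError in Python; excluded by Pre_dfs
      | some true => dfsB n a b rest chk cnt
      | some false =>
        dfsB n a b ((pos - a) :: (pos - b) :: (pos + a) :: (pos + b) :: rest)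
          (chk.set pos.toNat true) (cnt + 1)
  termination_by stack chk _ => (pvCountFalse chk, stack.length)
  decreasing_by
  · exact Prod.Lex.right _ (by simp)
  · exact Prod.Lex.right _ (by simp)
  · exact Prod.Lex.right _ (by simp)
  · exact Prod.Lex.left _ _ (pvCountFalse_set_lt' chk pos (by omega) h)

def dfs_alt (n : Int) (s : Int) (a : Int) (b : Int) (chk : List Bool) : Int :=
  (dfsB n a b [s] chk 0).1

-- ===== PRECONDITION & SPEC =====
-- Pre_ excludes inputs where the DFS can hit an index ≥ len(chk) (Python raises IndexError);
-- it keeps the cases where A returns 0 immediately (start out of [0,n) or already marked),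
-- on which both programs return 0 even when n > len(chk).
def Pre_dfs (n : Int) (s : Int) (a : Int) (b : Int) (chk : List Bool) : Prop :=
  n ≤ chk.length ∨ n ≤ s ∨ s < 0 ∨ PySem.List.pyGet? chk s = some true
instance (n : Int) (s : Int) (a : Int) (b : Int) (chk : List Bool) : Decidable (Pre_dfs n s a b chk) := by unfold Pre_dfs; infer_instance

def pvWitness_dfs : Int × Int × Int × Int × List Bool := (4, 0, 1, 2, [false, false, false, false])

def Spec_dfs (n : Int) (s : Int) (a : Int) (b : Int) (chk : List Bool) (out : Int) : Prop := out = dfs_alt n s a b chk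
instance (n : Int) (s : Int) (a : Int) (b : Int) (chk : List Bool) (out : Int) : Decidable (Spec_dfs n s a b chk out) := by unfold Spec_dfs; infer_instance

-- ===== CLAIM (what is proved, stated in full; the proofs are below) =====
def Claim_equal_dfs : Prop := ∀ (n : Int) (s : Int) (a : Int) (b : Int) (chk : List Bool), Dom_dfs n s a b chk → Pre_dfs n s a b chk → Spec_dfs n s a b chk (dfs n s a b chk)

-- ===== LEMMAS AND PROOFS =====

-- A's recursion never unmarks a cell
theorem dfsA_count_le (n a b : Int) : ∀ (fuel : Nat) (s : Int) (chk : List Bool),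
    pvCountFalse (dfsA n a b fuel s chk).2 ≤ pvCountFalse chk := by
  intro fuel
  induction fuel with
  | zero => intro s chk; simp [dfsA]
  | succ f ih =>
    intro s chk
    rw [dfsA]
    split
    · simp
    · split
      · simp
      · simp
      · next h =>
        simp only
        have h0 : pvCountFalse (chk.set s.toNat true) ≤ pvCountFalse chk :=
          le_of_lt (pvCountFalse_set_lt' chk s (by omega) h)
        calc pvCountFalse (dfsA n a b f (s+b) (dfsA n a b f (s+a) (dfsA n a b f (s-b) (dfsA n a b f (s-a) (chk.set s.toNat true)).2).2).2).2
            ≤ pvCountFalse (dfsA n a b f (s+a) (dfsA n a b f (s-b) (dfsA n a b f (s-a) (chk.set s.toNat true)).2).2).2 := ih _ _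
          _ ≤ pvCountFalse (dfsA n a b f (s-b) (dfsA n a b f (s-a) (chk.set s.toNat true)).2).2 := ih _ _
          _ ≤ pvCountFalse (dfsA n a b f (s-a) (chk.set s.toNat true)).2 := ih _ _
          _ ≤ pvCountFalse (chk.set s.toNat true) := ih _ _
          _ ≤ pvCountFalse chk := h0

-- simulation: one popped position of B's loop behaves like one recursive call of A
theorem dfsB_sim (n a b : Int) : ∀ (fuel : Nat) (s : Int) (chk : List Bool) (rest : List Int) (cnt : Int),
    pvCountFalse chk < fuel →
    dfsB n a b (s :: rest) chk cnt
      = dfsB n a b rest (dfsA n a b fuel s chk).2 (cnt + (dfsA n a b fuel s chk).1) := by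
  intro fuel
  induction fuel with
  | zero => intro s chk rest cnt h; omega
  | succ f ih =>
    intro s chk rest cnt hf
    rw [dfsB, dfsA]
    split
    · simp
    · split
      · next h => simp [h]
      · next h => simp [h]
      · next h =>
        simp only [h]
        have hs : 0 ≤ s := by omega
        have h1 : pvCountFalse (chk.set s.toNat true) < f := by
          have := pvCountFalse_set_lt' chk s hs h
          omega
        rw [ih (s - a) _ _ _ h1]
        rw [ih (s - b) _ _ _ (lt_of_le_of_lt (dfsA_count_le n a b f (s-a) _) h1)]
        rw [ih (s + a) _ _ _ (lt_of_le_of_lt (le_trans (dfsA_count_le n a b f (s-b) _) (dfsA_count_le n a b f (s-a) _)) h1)]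
        rw [ih (s + b) _ _ _ (lt_of_le_of_lt (le_trans (dfsA_count_le n a b f (s+a) _) (le_trans (dfsA_count_le n a b f (s-b) _) (dfsA_count_le n a b f (s-a) _))) h1)]
        congr 1
        ring

-- ===== VERDICT (by name: the statement is the Claim_ definition above) =====
theorem dfs_spec : Claim_equal_dfs := by
  intro n s a b chk _ _
  unfold Spec_dfs dfs dfs_alt
  have hf : pvCountFalse chk < chk.length + 1 := by
    have := List.count_le_length (l := chk) (a := false)
    simpa [pvCountFalse] using Nat.lt_succ_of_le this
  rw [dfsB_sim n a b (chk.length + 1) s chk [] 0 hf]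
  simp [dfsB]
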